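-- pv_equiv track=rewrite | github.com/ehsanasgari/pytorch-seq2seq | pytorch_misc.py | transpose_batch_sizes
-- ===== SOURCE A (Python) =====
-- def transpose_batch_sizes(lengths):
--     """
--     Given a list of sequence lengths per batch size (ie for an RNN where sequence lengths vary),
--      converts this into a list of batch sizes per timestep
--     :param lengths: Sorted (descending order) list of ints
--     :return: A list of length lengths[0]
--     """
--     max_len = lengths[0]
--     length_pointer = len(lengths) - 1
--     end_inds = []
--     for i in range(max_len):
--         while (length_pointer > 0) and lengths[length_pointer] <= i:
--             length_pointer -= 1
--         end_inds.append(length_pointer + 1)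
--     return end_inds
-- ===== SOURCE B (Python) =====
-- def transpose_batch_sizes(lengths):
--     """
--     Given a list of sequence lengths per batch size (ie for an RNN where sequence lengths vary),
--      converts this into a list of batch sizes per timestep
--     :param lengths: Sorted (descending order) list of ints
--     :return: A list of length lengths[0]
--     """
--     return [max(j for j, l in enumerate(lengths) if l > i) + 1
--             for i in range(lengths[0])]
-- ===== Notes on version B (the rewrite author's own statement) =====
-- stated objective: simpler
-- what changed: Replaces A's stateful monotone-pointer single pass (a while-loop pointer carried across timesteps) by an independent per-timestep scan: the batch size at timestep i is one past the last sequence still longer than i; Pre_ excludes only the empty list, on which A raises IndexError.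
import Mathlib
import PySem

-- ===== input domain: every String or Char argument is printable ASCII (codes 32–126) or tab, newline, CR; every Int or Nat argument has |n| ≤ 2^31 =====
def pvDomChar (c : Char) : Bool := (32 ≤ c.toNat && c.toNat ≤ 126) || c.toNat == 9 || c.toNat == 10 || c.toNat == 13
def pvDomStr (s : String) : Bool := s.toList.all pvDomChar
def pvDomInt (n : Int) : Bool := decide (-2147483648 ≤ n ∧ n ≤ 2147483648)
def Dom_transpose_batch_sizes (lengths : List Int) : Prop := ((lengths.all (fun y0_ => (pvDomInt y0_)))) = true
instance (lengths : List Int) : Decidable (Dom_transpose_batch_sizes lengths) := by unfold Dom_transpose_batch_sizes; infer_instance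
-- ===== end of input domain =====

-- B replaces A's carried monotone pointer by an independent per-timestep scan (batch size at timestep i = one past the last sequence still longer than i); A = B proved on all nonempty lists.

-- ===== PORT A =====
-- the inner 'while (length_pointer > 0) and lengths[length_pointer] <= i: length_pointer -= 1'
def aWhile (lengths : List Int) (lp i : Int) : Int :=
  if h : lp > 0 ∧ (PySem.List.pyGet? lengths lp).getD 0 ≤ i then
    aWhile lengths (lp - 1) i
  else lp
termination_by lp.toNat
decreasing_by omega

def transpose_batch_sizes (lengths : List Int) : List Int :=
  match PySem.List.pyGet? lengths 0 with
  | none => []  -- unreachable under Pre_: Python raises IndexError on the empty list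
  | some max_len =>
    ((PySem.List.pyRange 0 max_len 1).foldl
      (fun st i =>
        let lp := aWhile lengths st.1 i
        (lp, st.2 ++ [lp + 1]))
      (((lengths.length : Int) - 1, []))).2

-- ===== PORT B =====
-- max(j for j, l in enumerate(lengths) if l > i) + 1
def bStep (lengths : List Int) (i : Int) : Int :=
  match PySem.List.max?
      (((PySem.List.enumerate lengths 0).filter (fun p => decide (i < p.2))).map (fun p => p.1))
      (fun x => x) with
  | some j => j + 1
  | none => 0  -- unreachable: i < lengths[0] for every generated timestep, so index 0 always qualifies (Python's max never sees an empty generator)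

def transpose_batch_sizes_alt (lengths : List Int) : List Int :=
  match PySem.List.pyGet? lengths 0 with
  | none => []  -- unreachable under Pre_: Python raises IndexError on the empty list
  | some m => (PySem.List.pyRange 0 m 1).map (fun i => bStep lengths i)

-- ===== PRECONDITION & SPEC =====
-- Pre_ excludes only the empty list, on which both Pythons raise IndexError at the initial lengths[0] access.
def Pre_transpose_batch_sizes (lengths : List Int) : Prop := lengths ≠ []
instance (lengths : List Int) : Decidable (Pre_transpose_batch_sizes lengths) := by
  unfold Pre_transpose_batch_sizes; infer_instance
def pvWitness_transpose_batch_sizes : List Int := [3, 2, 1]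

def Spec_transpose_batch_sizes (lengths : List Int) (out : List Int) : Prop := out = transpose_batch_sizes_alt lengths
instance (lengths : List Int) (out : List Int) : Decidable (Spec_transpose_batch_sizes lengths out) := by unfold Spec_transpose_batch_sizes; infer_instance

-- ===== CLAIM =====
def Claim_equal_transpose_batch_sizes : Prop := ∀ (lengths : List Int), Dom_transpose_batch_sizes lengths → Pre_transpose_batch_sizes lengths → Spec_transpose_batch_sizes lengths (transpose_batch_sizes lengths)

-- ===== LEMMAS AND PROOFS =====

-- the while loop stops exactly at the last index ≤ lp whose length exceeds i (index 0 always qualifies)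
theorem aWhile_spec (lengths : List Int) (i : Int) (h00 : i < lengths.getD 0 0) (lp : Int) :
    0 ≤ lp → lp < (lengths.length : Int) →
      0 ≤ aWhile lengths lp i ∧ aWhile lengths lp i ≤ lp ∧
      i < lengths.getD (aWhile lengths lp i).toNat 0 ∧
      ∀ k : Int, aWhile lengths lp i < k → k ≤ lp → ¬ i < lengths.getD k.toNat 0 := by
  induction lp using aWhile.induct (lengths := lengths) (i := i) with
  | case1 lp hcnd ih =>
      intro h0 hn
      have hlt : lp.toNat < lengths.length := by omega
      have hget := PySem.List.pyGet?_eq_some_getElem (xs := lengths) h0 hn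
      have hgd : lengths.getD lp.toNat 0 = lengths[lp.toNat] := by
        rw [List.getD_eq_getElem?_getD, List.getElem?_eq_getElem hlt]; rfl
      have hle : ¬ i < lengths.getD lp.toNat 0 := by
        have := hcnd.2; rw [hget] at this; rw [hgd]; simpa using this
      rw [aWhile, dif_pos hcnd]
      obtain ⟨ih1, ih2, ih3, ih4⟩ := ih (by omega) (by omega)
      refine ⟨ih1, by omega, ih3, ?_⟩
      intro k hk1 hk2
      rcases eq_or_lt_of_le hk2 with heq | hlt'
      · subst heq; exact hle
      · exact ih4 k hk1 (by omega)
  | case2 lp hcnd =>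
      intro h0 hn
      rw [aWhile, dif_neg hcnd]
      rcases lt_or_ge 0 lp with hpos | hz
      · have hlt : lp.toNat < lengths.length := by omega
        have hget := PySem.List.pyGet?_eq_some_getElem (xs := lengths) h0 hn
        have hgd : lengths.getD lp.toNat 0 = lengths[lp.toNat] := by
          rw [List.getD_eq_getElem?_getD, List.getElem?_eq_getElem hlt]; rfl
        have hgt : i < lengths.getD lp.toNat 0 := by
          by_contra hle
          refine hcnd ⟨hpos, ?_⟩
          rw [hget]; rw [hgd] at hle; simpa using not_lt.mp hle
        exact ⟨h0, le_refl _, hgt, fun k hk1 hk2 => absurd (lt_of_lt_of_le hk1 hk2) (lt_irrefl _)⟩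
      · have hlp0 : lp = 0 := by omega
        subst hlp0
        exact ⟨le_refl _, le_refl _, by simpa using h00, fun k hk1 hk2 => by omega⟩

-- membership in the list of still-active indices built by B
theorem mem_active (lengths : List Int) (i x : Int) :
    x ∈ ((PySem.List.enumerate lengths 0).filter (fun p => decide (i < p.2))).map (fun p => p.1) ↔
    ∃ k : Nat, k < lengths.length ∧ x = (k : Int) ∧ i < lengths.getD k 0 := by
  simp only [List.mem_map, List.mem_filter, PySem.List.mem_enumerate_iff]
  constructor
  · rintro ⟨p, ⟨⟨k, hk, rfl⟩, hp⟩, rfl⟩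
    refine ⟨k, hk, by simp, ?_⟩
    have hgd : lengths.getD k 0 = lengths[k] := by
      rw [List.getD_eq_getElem?_getD, List.getElem?_eq_getElem hk]; rfl
    rw [hgd]; simpa using hp
  · rintro ⟨k, hk, rfl, hik⟩
    have hgd : lengths.getD k 0 = lengths[k] := by
      rw [List.getD_eq_getElem?_getD, List.getElem?_eq_getElem hk]; rfl
    exact ⟨((0 : Int) + k, lengths[k]), ⟨⟨k, hk, rfl⟩, by rw [hgd] at hik; simpa using hik⟩, by simp⟩

-- A's fresh pointer value + 1 agrees with B's per-timestep scan
theorem aWhile_eq_bStep (lengths : List Int) (hne : lengths ≠ []) (i : Int)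
    (hi : i < lengths.getD 0 0) :
    aWhile lengths ((lengths.length : Int) - 1) i + 1 = bStep lengths i := by
  have hpos : 0 < lengths.length := List.length_pos_iff.mpr hne
  obtain ⟨hv0, hvle, hvq, hvmax⟩ :=
    aWhile_spec lengths i hi ((lengths.length : Int) - 1) (by omega) (by omega)
  set v := aWhile lengths ((lengths.length : Int) - 1) i with hv
  set ys := ((PySem.List.enumerate lengths 0).filter (fun p => decide (i < p.2))).map (fun p => p.1) with hys
  have hvmem : v ∈ ys := by
    rw [hys, mem_active]
    exact ⟨v.toNat, by omega, by omega, hvq⟩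
  cases hmax : PySem.List.max? ys (fun x => x) with
  | none =>
      rw [PySem.List.max?_eq_none_iff] at hmax
      rw [hmax] at hvmem
      simp at hvmem
  | some m =>
      have hmmem : m ∈ ys := PySem.List.max?_mem hmax
      have hvm : v ≤ m := PySem.List.max?_isMax hmax v hvmem
      have hmv : m ≤ v := by
        obtain ⟨k, hk, rfl, hik⟩ := (mem_active lengths i m).mp (by rwa [hys] at hmmem)
        by_contra hlt
        exact hvmax (k : Int) (by omega) (by omega) (by simpa using hik)
      have : m = v := le_antisymm hmv hvm
      unfold bStep
      rw [← hys, hmax, this]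

-- running the while-loop again with a larger i continues from where it stopped
theorem aWhile_carry (lengths : List Int) (lp i' i : Int) (h : i' ≤ i) :
    aWhile lengths (aWhile lengths lp i') i = aWhile lengths lp i := by
  induction lp using aWhile.induct (lengths := lengths) (i := i') with
  | case1 lp hc ih =>
      have h1 : aWhile lengths lp i' = aWhile lengths (lp - 1) i' := by
        rw [aWhile]; rw [dif_pos hc]
      have h2 : aWhile lengths lp i = aWhile lengths (lp - 1) i := by
        rw [aWhile]; rw [dif_pos ⟨hc.1, le_trans hc.2 h⟩]
      rw [h1, ih, h2]
  | case2 lp hc =>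
      have h1 : aWhile lengths lp i' = lp := by rw [aWhile]; rw [dif_neg hc]
      rw [h1]

theorem fold_invariant (lengths : List Int) (hne : lengths ≠ [])
    (M : Int) (hM : lengths.getD 0 0 = M)
    (m : Nat) (hmM : (m : Int) ≤ M) :
    (PySem.List.pyRange 0 (m : Int) 1).foldl
      (fun st i =>
        let lp := aWhile lengths st.1 i
        (lp, st.2 ++ [lp + 1]))
      (((lengths.length : Int) - 1, [])) =
    ((if m = 0 then (lengths.length : Int) - 1 else aWhile lengths ((lengths.length : Int) - 1) ((m : Int) - 1)),
     (PySem.List.pyRange 0 (m : Int) 1).map (fun i => bStep lengths i)) := by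
  induction m with
  | zero => simp [PySem.List.pyRange_one_eq_nil]
  | succ k ih =>
      have hk : ((k+1 : Nat) : Int) = (k : Int) + 1 := by push_cast; ring
      rw [hk, PySem.List.pyRange_one_succ_right (by positivity : (0:Int) ≤ (k:Int))]
      rw [List.foldl_append, List.map_append, ih (by omega)]
      simp only [List.foldl_cons, List.foldl_nil]
      have hlp : aWhile lengths
          (if k = 0 then (lengths.length : Int) - 1 else aWhile lengths ((lengths.length : Int) - 1) ((k : Int) - 1))
          (k : Int) = aWhile lengths ((lengths.length : Int) - 1) (k : Int) := by
        rcases Nat.eq_zero_or_pos k with hz | hp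
        · simp [hz]
        · rw [if_neg (by omega)]
          exact aWhile_carry lengths _ _ _ (by omega)
      have hw : aWhile lengths ((lengths.length : Int) - 1) (k : Int) + 1 = bStep lengths (k : Int) :=
        aWhile_eq_bStep lengths hne (k : Int) (by omega)
      simp only [hlp]
      rw [if_neg (Nat.succ_ne_zero k)]
      simp [hw]

-- ===== VERDICT =====
theorem transpose_batch_sizes_spec : Claim_equal_transpose_batch_sizes := by
  intro lengths _ hne
  unfold Spec_transpose_batch_sizes transpose_batch_sizes transpose_batch_sizes_alt
  have hpos : 0 < lengths.length := List.length_pos_iff.mpr hne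
  cases hg : PySem.List.pyGet? lengths 0 with
  | none => rfl
  | some max_len =>
      dsimp only
      have hM : lengths.getD 0 0 = max_len := by
        have := PySem.List.pyGet?_eq_some_getElem (xs := lengths) (i := 0) (by omega) (by exact_mod_cast hpos)
        rw [hg] at this
        have h0 : lengths.getD 0 0 = lengths[0] := by
          rw [List.getD_eq_getElem?_getD, List.getElem?_eq_getElem hpos]; rfl
        rw [h0]
        simpa using this.symm
      by_cases hle : max_len ≤ 0
      · rw [PySem.List.pyRange_one_eq_nil hle]; simp
      · have hm : max_len = ((max_len.toNat : Nat) : Int) := by omega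
        rw [hm, fold_invariant lengths hne max_len hM max_len.toNat (by omega)]
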